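-- pv_equiv track=rewrite | github.com/michal7kw/SRF_SRRM3 | GTEx/GTEx_long_read_data.py | get_exon_phases
-- ===== SOURCE A (Python) =====
-- from typing import Dict, List, Tuple
--
-- def get_exon_phases(exons: List[dict]) -> List[Tuple[int, int]]:
--     """Calculate phase for each exon"""
--     phases = []
--     current_phase = 0
--
--     for exon in exons:
--         length = exon['length']
--         end_phase = (current_phase + length) % 3
--         phases.append((current_phase, end_phase))
--         current_phase = end_phase
--
--     return phases
-- ===== SOURCE B (Python) =====
-- from typing import Dict, List, Tuple
--
-- def get_exon_phases(exons: List[dict]) -> List[Tuple[int, int]]: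
--     """Calculate phase for each exon: knowing the total length up front,
--     walk the exons BACKWARDS, subtracting each length from the running
--     cumulative total, and build the phase list back-to-front."""
--     cur = sum(e['length'] for e in exons)
--     out = []
--     for e in reversed(exons):
--         l = e['length']
--         out.append(((cur - l) % 3, cur % 3))
--         cur -= l
--     out.reverse()
--     return out
-- ===== Notes on version B (the rewrite author's own statement) =====
-- stated objective: alternative
-- what changed: Instead of A's forward pass threading a running phase, B first computes the total length, then walks the exons backwards subtracting each length from the cumulative total and builds the phase list back-to-front, reversing it at the end.
import Mathlib
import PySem

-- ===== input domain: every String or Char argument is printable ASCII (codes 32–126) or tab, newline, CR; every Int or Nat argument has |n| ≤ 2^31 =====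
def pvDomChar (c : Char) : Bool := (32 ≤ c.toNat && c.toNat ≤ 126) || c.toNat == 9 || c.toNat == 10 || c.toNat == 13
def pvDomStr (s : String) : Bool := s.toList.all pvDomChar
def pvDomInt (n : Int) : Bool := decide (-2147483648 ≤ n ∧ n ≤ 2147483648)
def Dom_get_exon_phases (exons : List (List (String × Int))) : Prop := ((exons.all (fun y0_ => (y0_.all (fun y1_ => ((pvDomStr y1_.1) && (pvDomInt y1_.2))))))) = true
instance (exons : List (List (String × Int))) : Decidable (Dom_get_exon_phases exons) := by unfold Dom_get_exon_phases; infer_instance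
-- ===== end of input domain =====

-- B precomputes the total length, then walks the exons backwards subtracting lengths
-- and builds the phase list back-to-front; objective: alternative decomposition.


-- ===== PORT A =====
-- exon['length'] : first-match lookup; KeyError (no "length" key) is excluded by Pre_,
-- so the .getD 0 default is never reached on admitted inputs.
def get_exon_phases (exons : List (List (String × Int))) : List (Int × Int) :=
  (exons.foldl
    (fun (st : List (Int × Int) × Int) exon =>
      let length := (exon.lookup "length").getD 0
      let end_phase := PySem.Int.mod (st.2 + length) 3
      (st.1 ++ [(st.2, end_phase)], end_phase))
    ([], 0)).1

-- ===== PORT B =====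
-- total length first, then a backward pass subtracting lengths, output built back-to-front
def get_exon_phases_alt (exons : List (List (String × Int))) : List (Int × Int) :=
  let total := (exons.map (fun e => (e.lookup "length").getD 0)).foldl (· + ·) 0
  (exons.reverse.foldl
    (fun (st : List (Int × Int) × Int) e =>
      let l := (e.lookup "length").getD 0
      (st.1 ++ [(PySem.Int.mod (st.2 - l) 3, PySem.Int.mod st.2 3)], st.2 - l))
    ([], total)).1.reverse

-- ===== PRECONDITION & SPEC =====
-- Pre_ excludes exactly the inputs where Python A raises KeyError: an exon dict without a "length" key.
def Pre_get_exon_phases (exons : List (List (String × Int))) : Prop :=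
  ∀ e ∈ exons, "length" ∈ e.map Prod.fst
instance (exons : List (List (String × Int))) : Decidable (Pre_get_exon_phases exons) := by
  unfold Pre_get_exon_phases; infer_instance
def pvWitness_get_exon_phases : (List (List (String × Int))) :=
  [[("length", 4)], [("length", 2)], [("length", 7)]]
def Spec_get_exon_phases (exons : List (List (String × Int))) (out : List (Int × Int)) : Prop := out = get_exon_phases_alt exons
instance (exons : List (List (String × Int))) (out : List (Int × Int)) : Decidable (Spec_get_exon_phases exons out) := by unfold Spec_get_exon_phases; infer_instance

-- ===== CLAIM (what is proved, stated in full; the proofs are below) =====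
def Claim_equal_get_exon_phases : Prop := ∀ (exons : List (List (String × Int))), Dom_get_exon_phases exons → Pre_get_exon_phases exons → Spec_get_exon_phases exons (get_exon_phases exons)

-- ===== LEMMAS AND PROOFS =====

-- reference recursion: the exact phase sequence starting from running sum s
def phasesFrom (s : Int) : List Int → List (Int × Int)
  | [] => []
  | x :: xs => (s % 3, (s + x) % 3) :: phasesFrom (s + x) xs

theorem pymod3 (a : Int) : PySem.Int.mod a 3 = a % 3 :=
  PySem.Int.mod_eq_emod_of_pos (by norm_num)

theorem foldA_eq (exons : List (List (String × Int))) : ∀ (s : Int) (acc : List (Int × Int)),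
    (exons.foldl
      (fun (st : List (Int × Int) × Int) exon =>
        (st.1 ++ [(st.2, (st.2 + (exon.lookup "length").getD 0) % 3)],
          (st.2 + (exon.lookup "length").getD 0) % 3))
      (acc, s % 3)).1
    = acc ++ phasesFrom s (exons.map (fun e => (e.lookup "length").getD 0)) := by
  induction exons with
  | nil => intro s acc; simp [phasesFrom]
  | cons e es ih =>
    intro s acc
    have h : (s % 3 + (e.lookup "length").getD 0) % 3
        = (s + (e.lookup "length").getD 0) % 3 := by omega
    simp only [List.foldl_cons, h]
    rw [ih (s + (e.lookup "length").getD 0) (acc ++ [(s % 3, (s + (e.lookup "length").getD 0) % 3)])]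
    simp [phasesFrom]

-- B's backward fold, expressed as a foldr over the length list:
-- starting the countdown at s + sum, it produces the phases of `phasesFrom s` in reverse.
theorem foldB_eq (lens : List Int) : ∀ (s : Int),
    lens.foldr
      (fun l (st : List (Int × Int) × Int) =>
        (st.1 ++ [((st.2 - l) % 3, st.2 % 3)], st.2 - l))
      ([], s + lens.foldl (· + ·) 0)
    = ((phasesFrom s lens).reverse, s) := by
  induction lens with
  | nil => intro s; simp [phasesFrom]
  | cons x xs ih =>
    intro s
    have hsum : s + (x :: xs).foldl (· + ·) 0 = (s + x) + xs.foldl (· + ·) 0 := by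
      have h0 : ∀ (ys : List Int) (a : Int), ys.foldl (· + ·) a = a + ys.foldl (· + ·) 0 := by
        intro ys
        induction ys with
        | nil => intro a; simp
        | cons y ys ihy => intro a; simp only [List.foldl_cons]; rw [ihy (a + y), ihy (0 + y)]; ring
      rw [show (x :: xs).foldl (· + ·) 0 = xs.foldl (· + ·) (0 + x) from rfl, h0 xs (0 + x)]
      ring
    simp only [List.foldr_cons, hsum, ih (s + x)]
    simp [phasesFrom]

-- ===== VERDICT (by name: the statement is the Claim_ definition above) =====
theorem get_exon_phases_spec : Claim_equal_get_exon_phases := by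
  intro exons _ _
  simp only [Spec_get_exon_phases, get_exon_phases, get_exon_phases_alt, pymod3]
  rw [List.foldl_reverse]
  have hA := foldA_eq exons 0 []
  norm_num at hA
  rw [hA]
  have hB := foldB_eq (exons.map (fun e => (e.lookup "length").getD 0)) 0
  rw [List.foldr_map] at hB
  norm_num at hB
  rw [hB]
  simp
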